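-- pv_equiv track=rewrite | github.com/starovp/bgl | app/game_forms.py | PowerGridVictory
-- ===== SOURCE A (Python) =====
-- def PowerGridVictory(scores):
--     fields = ['money', 'plants']
--     for field in fields:
--         scores = sorted(
--             scores,
--             key=lambda i: (
--                 i[f'{field}']
--             ),
--             reverse=True
--         )
--     return scores
-- ===== SOURCE B (Python) =====
-- def PowerGridVictory(scores):
--     return sorted(scores, key=lambda i: (i['plants'], i['money']), reverse=True)
-- ===== Notes on version B (the rewrite author's own statement) =====
-- stated objective: idiomatic
-- what changed: Replaces the two-pass chain of stable sorts (by money, then by plants) with a single sorted call on the composite key (plants, money) with reverse=True, which yields the identical order including tie-breaking.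
import Mathlib
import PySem

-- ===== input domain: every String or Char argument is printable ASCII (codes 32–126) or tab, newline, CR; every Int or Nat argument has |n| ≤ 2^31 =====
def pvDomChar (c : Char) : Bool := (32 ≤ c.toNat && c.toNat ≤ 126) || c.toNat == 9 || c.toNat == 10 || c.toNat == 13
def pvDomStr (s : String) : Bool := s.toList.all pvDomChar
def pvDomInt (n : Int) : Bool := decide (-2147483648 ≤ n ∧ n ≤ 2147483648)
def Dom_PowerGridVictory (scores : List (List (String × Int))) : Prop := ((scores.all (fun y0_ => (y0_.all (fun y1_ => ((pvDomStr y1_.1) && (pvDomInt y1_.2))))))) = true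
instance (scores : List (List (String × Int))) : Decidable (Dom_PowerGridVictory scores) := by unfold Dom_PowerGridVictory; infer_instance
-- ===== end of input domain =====

-- B replaces A's two-pass chain of stable sorts (by money, then by plants) with one sorted
-- call on the composite key (plants, money), reverse=True; same return value (idiomatic rewrite).

-- ===== PORT A =====
-- the loop 'for field in fields: scores = sorted(scores, key=lambda i: i[field], reverse=True)'.
-- i[field] is a dict lookup, ported as getD with default 0: Pre_ guarantees the key is present,
-- which is exactly where the Python returns (it raises KeyError on a row missing the field).
def PowerGridVictory (scores : List (List (String × Int))) : List (List (String × Int)) :=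
  (["money", "plants"]).foldl
    (fun sc field => PySem.List.sorted sc (fun i => (PySem.Dict.mk i).getD field 0) true) scores

-- ===== PORT B =====
def PowerGridVictory_alt (scores : List (List (String × Int))) : List (List (String × Int)) :=
  PySem.List.sorted2 scores
    (fun i => (PySem.Dict.mk i).getD "plants" 0)
    (fun i => (PySem.Dict.mk i).getD "money" 0) true

-- ===== PRECONDITION & SPEC =====
-- Pre_ excludes exactly the inputs where Python's i['money'] / i['plants'] raises KeyError
-- (a row missing one of the two fields); A and B raise there alike.
def Pre_PowerGridVictory (scores : List (List (String × Int))) : Prop :=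
  ∀ row ∈ scores, (PySem.Dict.mk row).contains "money" = true ∧ (PySem.Dict.mk row).contains "plants" = true
instance (scores : List (List (String × Int))) : Decidable (Pre_PowerGridVictory scores) := by unfold Pre_PowerGridVictory; infer_instance

def pvWitness_PowerGridVictory : (List (List (String × Int))) :=
  [[("money", 3), ("plants", 1)], [("money", 7), ("plants", 1)]]

def Spec_PowerGridVictory (scores : List (List (String × Int))) (out : List (List (String × Int))) : Prop := out = PowerGridVictory_alt scores
instance (scores : List (List (String × Int))) (out : List (List (String × Int))) : Decidable (Spec_PowerGridVictory scores out) := by unfold Spec_PowerGridVictory; infer_instance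

-- ===== CLAIM (what is proved, stated in full; the proofs are below) =====
def Claim_equal_PowerGridVictory : Prop := ∀ (scores : List (List (String × Int))), Dom_PowerGridVictory scores → Pre_PowerGridVictory scores → Spec_PowerGridVictory scores (PowerGridVictory scores)

-- ===== LEMMAS AND PROOFS =====

-- the composite lex key both programs' orders are measured against
def pvLex {α : Type} (k1 k2 : α → Int) (a : α) : Int ×ₗ Int := toLex (k1 a, k2 a)

-- insertBy splits its input around the inserted element; everything before it refuses `before`,
-- and the element right after it (if any) accepts it.
theorem pv_insertBy_split {α : Type} (b : α → α → Bool) (x : α) (L : List α) :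
    ∃ u v, PySem.List.insertBy b x L = u ++ x :: v ∧ L = u ++ v ∧
      (∀ y ∈ u, b x y = false) ∧ (∀ z ∈ v.head?, b x z = true) := by
  induction L with
  | nil => exact ⟨[], [], by simp [PySem.List.insertBy]⟩
  | cons y ys ih =>
    by_cases h : b x y = true
    · exact ⟨[], y :: ys, by simp [PySem.List.insertBy, h]⟩
    · obtain ⟨u, v, h1, h2, h3, h4⟩ := ih
      refine ⟨y :: u, v, ?_, by simp [h2], ?_, h4⟩
      · simp [PySem.List.insertBy, h, h1]
      · intro z hz
        rcases hz with _ | hz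
        · simpa using h
        · exact h3 z (by assumption)

-- one insertion step of the reverse insertion sort, seen through a filter confined to one
-- key class: the new element lands at the end of its class.
theorem pv_filter_insertBy {α κ : Type} [LinearOrder κ] (k : α → κ) (v : κ) (p : α → Bool)
    (hp : ∀ a, p a = true → k a = v) (x : α) (acc : List α)
    (hacc : acc.Pairwise (fun a b => k b ≤ k a)) :
    (PySem.List.insertBy (fun a b => decide (k b < k a)) x acc).filter p =
      acc.filter p ++ (if p x then [x] else []) := by
  obtain ⟨u, w, h1, h2, h3, h4⟩ := pv_insertBy_split (fun a b => decide (k b < k a)) x acc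
  subst h2
  rw [h1]
  by_cases hpx : p x = true
  · have hkx : k x = v := hp x hpx
    have hw : w.filter p = [] := by
      rw [List.filter_eq_nil_iff]
      intro z hz
      cases w with
      | nil => simp at hz
      | cons h0 t =>
        have hh : k h0 < k x := by simpa using h4 h0 (by simp)
        have hz' : k z ≤ k h0 := by
          rcases hz with _ | hz
          · exact le_refl _
          · have := (List.pairwise_append.mp hacc).2.1
            exact (List.pairwise_cons.mp this).1 z (by assumption)
        intro hpz
        exact absurd (lt_of_le_of_lt hz' hh) (by rw [hp z hpz, hkx]; exact lt_irrefl v)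
    simp [List.filter_append, hpx, hw]
  · simp [List.filter_append, hpx]

-- stability, filter form: sorted(..., reverse=True) preserves any filter confined to one key class
theorem pv_filter_sorted {α κ : Type} [LinearOrder κ] (k : α → κ) (v : κ) (p : α → Bool)
    (hp : ∀ a, p a = true → k a = v) (M : List α) :
    (PySem.List.sorted M k true).filter p = M.filter p := by
  induction M using List.reverseRecOn with
  | nil => simp [PySem.List.sorted]
  | append_singleton N x ih =>
    rw [PySem.List.sorted_rev_eq_foldl_insertBy, List.foldl_append]
    simp only [List.foldl]
    rw [← PySem.List.sorted_rev_eq_foldl_insertBy,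
      pv_filter_insertBy k v p hp x _ (PySem.List.sorted_pairwise_rev N k), ih,
      List.filter_append]
    by_cases hpx : p x = true <;> simp [hpx]

-- uniqueness: two key-descending lists with the same elements in the same order inside
-- every key class are equal
theorem pv_uniq {α κ : Type} [LinearOrder κ] [DecidableEq κ] (k : α → κ) :
    ∀ P Q : List α, P.Pairwise (fun a b => k b ≤ k a) → Q.Pairwise (fun a b => k b ≤ k a) →
      (∀ v, P.filter (fun a => decide (k a = v)) = Q.filter (fun a => decide (k a = v))) → P = Q := by
  intro P
  induction P with
  | nil =>
    intro Q _ hQ hf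
    cases Q with
    | nil => rfl
    | cons b Q' =>
      have := hf (k b)
      simp at this
  | cons a P' ih =>
    intro Q hP hQ hf
    cases Q with
    | nil =>
      have := hf (k a)
      simp at this
    | cons b Q' =>
      have hab : k a = k b := by
        rcases lt_trichotomy (k a) (k b) with h | h | h
        · have hfb := hf (k b)
          have hPnil : (a :: P').filter (fun x => decide (k x = k b)) = [] := by
            rw [List.filter_eq_nil_iff]
            intro z hz
            have hz' : k z ≤ k a := by
              rcases hz with _ | hz
              · exact le_refl _
              · exact (List.pairwise_cons.mp hP).1 z (by assumption)
            simp; intro he; rw [he] at hz'; exact absurd (lt_of_le_of_lt hz' h) (lt_irrefl _)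
          rw [hPnil] at hfb
          simp at hfb
        · exact h
        · have hfa := hf (k a)
          have hQnil : (b :: Q').filter (fun x => decide (k x = k a)) = [] := by
            rw [List.filter_eq_nil_iff]
            intro z hz
            have hz' : k z ≤ k b := by
              rcases hz with _ | hz
              · exact le_refl _
              · exact (List.pairwise_cons.mp hQ).1 z (by assumption)
            simp; intro he; rw [he] at hz'; exact absurd (lt_of_le_of_lt hz' h) (lt_irrefl _)
          rw [hQnil] at hfa
          simp at hfa
      have hfa := hf (k a)
      rw [List.filter_cons, List.filter_cons] at hfa
      simp [hab] at hfa
      obtain ⟨hab', htail⟩ := hfa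
      subst hab'
      congr 1
      apply ih Q' (List.pairwise_cons.mp hP).2 (List.pairwise_cons.mp hQ).2
      intro v
      by_cases hv : k a = v
      · subst hv; exact htail
      · have := hf v
        rw [List.filter_cons, List.filter_cons] at this
        simpa [hv] using this

-- k1-descending + k2-descending within each k1 class = lex-descending
theorem pv_pairwise_lex {α : Type} (k1 k2 : α → Int) (L : List α)
    (h1 : L.Pairwise (fun a b => k1 b ≤ k1 a))
    (h2 : ∀ v, (L.filter (fun a => decide (k1 a = v))).Pairwise (fun a b => k2 b ≤ k2 a)) :
    L.Pairwise (fun a b => pvLex k1 k2 b ≤ pvLex k1 k2 a) := by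
  induction L with
  | nil => exact List.Pairwise.nil
  | cons a L' ih =>
    rw [List.pairwise_cons]
    constructor
    · intro b hb
      have hk1 : k1 b ≤ k1 a := (List.pairwise_cons.mp h1).1 b hb
      rcases lt_or_eq_of_le hk1 with h | h
      · exact le_of_lt (by rw [pvLex, pvLex, Prod.Lex.lt_iff]; left; exact h)
      · have hfilt := h2 (k1 a)
        rw [List.filter_cons] at hfilt
        simp at hfilt
        have hk2 : k2 b ≤ k2 a := hfilt.1 b hb (by rw [h])
        rw [pvLex, pvLex]
        rcases lt_or_eq_of_le hk2 with h' | h'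
        · exact le_of_lt (by rw [Prod.Lex.lt_iff]; right; exact ⟨h, h'⟩)
        · have : (k1 b, k2 b) = (k1 a, k2 a) := by rw [h, h']
          rw [this]
    · apply ih (List.pairwise_cons.mp h1).2
      intro v
      have := h2 v
      rw [List.filter_cons] at this
      by_cases hv : k1 a = v
      · simp [hv] at this
        exact this.2
      · simpa [hv] using this

-- A's two chained stable reverse sorts equal one reverse sort by the lex key
theorem pv_two_sorts_eq_lex {α : Type} (k1 k2 : α → Int) (xs : List α) :
    PySem.List.sorted (PySem.List.sorted xs k2 true) k1 true =
      PySem.List.sorted xs (pvLex k1 k2) true := by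
  apply pv_uniq (pvLex k1 k2)
  · apply pv_pairwise_lex
    · exact PySem.List.sorted_pairwise_rev _ k1
    · intro v
      rw [pv_filter_sorted k1 v _ (by intro a h; simpa using h)]
      exact (PySem.List.sorted_pairwise_rev xs k2).sublist List.filter_sublist
  · exact PySem.List.sorted_pairwise_rev _ _
  · intro v
    have hRHS : (PySem.List.sorted xs (pvLex k1 k2) true).filter
        (fun a => decide (pvLex k1 k2 a = v)) = xs.filter (fun a => decide (pvLex k1 k2 a = v)) :=
      pv_filter_sorted (pvLex k1 k2) v _ (by intro a h; simpa using h) xs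
    rw [hRHS]
    have hp1 : ∀ a, (decide (pvLex k1 k2 a = v)) = true → k1 a = (ofLex v).1 := by
      intro a h
      simp [pvLex] at h
      rw [← h]
      rfl
    have hp2 : ∀ a, (decide (pvLex k1 k2 a = v)) = true → k2 a = (ofLex v).2 := by
      intro a h
      simp [pvLex] at h
      rw [← h]
      rfl
    rw [pv_filter_sorted k1 (ofLex v).1 _ hp1, pv_filter_sorted k2 (ofLex v).2 _ hp2]

-- B's sorted2 (Python's tuple key) is the reverse sort by the same lex key
theorem pv_sorted2_eq_lex {α : Type} (k1 k2 : α → Int) (xs : List α) :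
    PySem.List.sorted2 xs k1 k2 true = PySem.List.sorted xs (pvLex k1 k2) true := by
  have hfun : (fun a b => decide (k1 b < k1 a) || (!decide (k1 a < k1 b) && decide (k2 b < k2 a)))
      = (fun (a b : α) => decide (pvLex k1 k2 b < pvLex k1 k2 a)) := by
    funext a b
    have hlex : (pvLex k1 k2 b < pvLex k1 k2 a) ↔
        (k1 b < k1 a ∨ k1 b = k1 a ∧ k2 b < k2 a) := by
      rw [pvLex, pvLex, Prod.Lex.lt_iff]
      rfl
    rw [Bool.eq_iff_iff]
    simp only [Bool.or_eq_true, Bool.and_eq_true, decide_eq_true_eq, Bool.not_eq_true',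
      decide_eq_false_iff_not, hlex]
    omega
  rw [PySem.List.sorted_rev_eq_foldl_insertBy, ← hfun]
  rfl

-- ===== VERDICT (by name: the statement is the Claim_ definition above) =====
theorem PowerGridVictory_spec : Claim_equal_PowerGridVictory := by
  intro scores _ _
  show _ = _
  unfold PowerGridVictory PowerGridVictory_alt
  simp only [List.foldl]
  rw [pv_two_sorts_eq_lex, pv_sorted2_eq_lex]
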